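-- pv_equiv track=rewrite | github.com/Tulpana/ARC-AGI-2 | arc_agi_2_submission/ril/solver.py | _detect_color_mapping_setwise
-- ===== SOURCE A (Python) =====
-- from typing import Iterable, List, Dict, Tuple, Any, Optional, Sequence, Set, Mapping
--
-- def _detect_color_mapping_setwise(color_mappings: List[Dict]) -> Dict[int,int]:
--     """Simple 1-1 mapping by sorted sets; returns {} if inconsistent."""
--     if not color_mappings: return {}
--     mapping: Dict[int,int] = {}
--     for cm in color_mappings:
--         ins = sorted(cm.get("input_colors", set()))
--         outs = sorted(cm.get("output_colors", set()))
--         if len(ins) != len(outs):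
--             continue
--         for i, inc in enumerate(ins):
--             outc = outs[i]
--             if inc in mapping and mapping[inc] != outc:
--                 return {}
--             mapping[inc] = outc
--     return mapping
-- ===== SOURCE B (Python) =====
-- from typing import List, Dict
--
--
-- def _detect_color_mapping_setwise(color_mappings: List[Dict]) -> Dict[int, int]:
--     """Min-extraction pairing, then setdefault validation; returns {} if inconsistent."""
--     pairs = []
--     for cm in color_mappings:
--         ins = list(cm.get("input_colors", set()))
--         outs = list(cm.get("output_colors", set()))
--         if len(ins) != len(outs):
--             continue
--         while ins:
--             i = min(ins)
--             o = min(outs)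
--             ins.remove(i)
--             outs.remove(o)
--             pairs.append((i, o))
--     mapping: Dict[int, int] = {}
--     for i, o in pairs:
--         if mapping.setdefault(i, o) != o:
--             return {}
--     return mapping
-- ===== Notes on version B (the rewrite author's own statement) =====
-- stated objective: alternative
-- what changed: A sorts both color sets, zips positionally via enumerate/index, and aborts inside the same loop at the first conflicting assignment; B never sorts: it pairs colors by repeated min-extraction (pop the minimum of each remaining collection), collects all pairs in a flat list, and validates them in a separate setdefault pass.
import Mathlib
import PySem

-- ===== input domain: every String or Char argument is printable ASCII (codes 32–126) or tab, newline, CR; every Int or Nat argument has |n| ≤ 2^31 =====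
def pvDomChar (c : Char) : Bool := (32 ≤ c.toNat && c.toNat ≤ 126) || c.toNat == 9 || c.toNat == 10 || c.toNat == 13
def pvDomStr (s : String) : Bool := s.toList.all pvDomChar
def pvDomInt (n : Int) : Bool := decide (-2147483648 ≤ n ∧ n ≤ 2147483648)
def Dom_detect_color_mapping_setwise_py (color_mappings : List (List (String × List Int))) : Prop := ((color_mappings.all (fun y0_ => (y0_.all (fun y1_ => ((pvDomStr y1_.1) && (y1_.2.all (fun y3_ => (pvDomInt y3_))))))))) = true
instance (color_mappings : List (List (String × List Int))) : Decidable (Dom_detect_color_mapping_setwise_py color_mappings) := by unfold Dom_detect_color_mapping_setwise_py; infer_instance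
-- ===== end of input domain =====

-- B replaces A's sort-zip-and-abort-inline scheme by sort-free min-extraction pairing plus a
-- separate setdefault validation pass — same return value (objective: alternative).
-- ===== PORT A =====
-- sorted(cm.get(key, set())): dict lookup with a default, then Python's sort.
def pvASortedGet (cm : List (String × List Int)) (key : String) : List Int :=
  PySem.List.sorted ((PySem.Dict.ofList cm).getD key []) (fun x => x) false

-- for i, inc in enumerate(ins): outc = outs[i] — the index is in range (lengths checked equal),
-- so the default of pyGetD is never used.
def pvAPairs (ins outs : List Int) : List (Int × Int) :=
  (PySem.List.enumerate ins).map (fun p => (p.2, PySem.List.pyGetD outs p.1 0))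

def pvAInner : List (Int × Int) → PySem.Dict Int Int → Option (PySem.Dict Int Int)
  | [], m => some m
  | (inc, outc) :: rest, m =>
    if m.contains inc && (m.getD inc 0 != outc) then none
    else pvAInner rest (m.insert inc outc)

def pvAOuter : List (List (String × List Int)) → PySem.Dict Int Int → Option (PySem.Dict Int Int)
  | [], m => some m
  | cm :: rest, m =>
    let ins := pvASortedGet cm "input_colors"
    let outs := pvASortedGet cm "output_colors"
    if ins.length ≠ outs.length then pvAOuter rest m
    else
      match pvAInner (pvAPairs ins outs) m with
      | none => none
      | some m' => pvAOuter rest m'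

def detect_color_mapping_setwise_py (color_mappings : List (List (String × List Int))) : List (Int × Int) :=
  if color_mappings = [] then []
  else
    match pvAOuter color_mappings PySem.Dict.empty with
    | none => []
    | some m => m.items

-- ===== PORT B =====
-- list.remove removes one occurrence, shortening the list (termination of the while loop)
lemma pvRemove?_length {xs ys : List Int} {v : Int} (h : PySem.List.remove? xs v = some ys) :
    ys.length < xs.length := by
  induction xs generalizing ys with
  | nil => simp [PySem.List.remove?] at h
  | cons x t ih =>
    by_cases hx : x = v
    · subst hx; rw [PySem.List.remove?_cons_self] at h
      cases h; simp
    · rw [PySem.List.remove?_cons_of_ne t hx] at h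
      cases ht : PySem.List.remove? t v with
      | none => rw [ht] at h; simp at h
      | some ts =>
        rw [ht] at h; cases h
        have := ih ht; simp; omega


-- while ins: i = min(ins); o = min(outs); ins.remove(i); outs.remove(o); pairs.append((i, o))
def pvBExtract (ins outs : List Int) : List (Int × Int) :=
  match PySem.List.min? ins (fun x => x) with
  | none => []      -- ins is empty: the while loop stops
  | some i =>
    match PySem.List.min? outs (fun x => x) with
    | none => []    -- unreachable: lengths were checked equal
    | some o =>
      match h2 : PySem.List.remove? ins i, PySem.List.remove? outs o with
      | some ins', some outs' => (i, o) :: pvBExtract ins' outs'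
      | _, _ => []  -- unreachable: the minimum is a member
termination_by ins.length
decreasing_by exact pvRemove?_length h2

def pvBPairsOf (cm : List (String × List Int)) : List (Int × Int) :=
  let ins := (PySem.Dict.ofList cm).getD "input_colors" []
  let outs := (PySem.Dict.ofList cm).getD "output_colors" []
  if ins.length ≠ outs.length then [] else pvBExtract ins outs

-- for i, o in pairs: if mapping.setdefault(i, o) != o: return {}
def pvBValidate : List (Int × Int) → PySem.Dict Int Int → Option (PySem.Dict Int Int)
  | [], m => some m
  | (i, o) :: rest, m =>
    if ((m.get? i).getD o) != o then none
    else pvBValidate rest (m.setdefault i o)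

def detect_color_mapping_setwise_py_alt (color_mappings : List (List (String × List Int))) : List (Int × Int) :=
  let pairs := color_mappings.foldl (fun acc cm => acc ++ pvBPairsOf cm) []
  match pvBValidate pairs PySem.Dict.empty with
  | none => []
  | some m => m.items

-- ===== PRECONDITION & SPEC =====
def Spec_detect_color_mapping_setwise_py (color_mappings : List (List (String × List Int))) (out : List (Int × Int)) : Prop := out = detect_color_mapping_setwise_py_alt color_mappings
instance (color_mappings : List (List (String × List Int))) (out : List (Int × Int)) : Decidable (Spec_detect_color_mapping_setwise_py color_mappings out) := by unfold Spec_detect_color_mapping_setwise_py; infer_instance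

-- ===== CLAIM (what is proved, stated in full; the proofs are below) =====
def Claim_equal_detect_color_mapping_setwise_py : Prop := ∀ (color_mappings : List (List (String × List Int))), Dom_detect_color_mapping_setwise_py color_mappings → Spec_detect_color_mapping_setwise_py color_mappings (detect_color_mapping_setwise_py color_mappings)

-- ===== LEMMAS AND PROOFS =====

-- extracting the minimum and removing it peels the head of the sorted list
lemma pvSorted_cons {xs ys : List Int} {m : Int}
    (hm : PySem.List.min? xs (fun x => x) = some m)
    (hr : PySem.List.remove? xs m = some ys) :
    PySem.List.sorted xs (fun x => x) false = m :: PySem.List.sorted ys (fun x => x) false := by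
  have hmem : m ∈ xs := PySem.List.min?_mem hm
  have hys : ys = xs.erase m := by
    rw [PySem.List.remove?_eq_some_erase xs m hmem] at hr
    cases hr; rfl
  apply PySem.List.sorted_id_eq_of_perm_of_pairwise
  · have p1 : (m :: PySem.List.sorted ys (fun x => x) false).Perm (m :: ys) :=
      (PySem.List.sorted_perm ys (fun x => x) false).cons m
    have p2 : (m :: ys).Perm xs := by
      rw [hys]; exact (List.perm_cons_erase hmem).symm
    exact p1.trans p2
  · rw [List.pairwise_cons]
    refine ⟨?_, ?_⟩
    · intro b hb
      have hb' : b ∈ ys := (PySem.List.sorted_perm ys (fun x => x) false).mem_iff.mp hb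
      have hbx : b ∈ xs := by
        rw [hys] at hb'; exact List.mem_of_mem_erase hb'
      exact PySem.List.min?_isMin hm b hbx
    · exact PySem.List.sorted_pairwise ys (fun x => x)

lemma pvAPairs_eq_zip (ins outs : List Int) (s : Nat) (h : s + ins.length ≤ outs.length) :
    (PySem.List.enumerate ins (s : Int)).map (fun p => (p.2, PySem.List.pyGetD outs p.1 0))
      = ins.zip (outs.drop s) := by
  induction ins generalizing s with
  | nil => simp [PySem.List.enumerate]
  | cons x xs ih =>
    simp only [PySem.List.enumerate_cons, List.map_cons]
    have h1 : s < outs.length := by simp at h; omega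
    rw [List.drop_eq_getElem_cons h1]
    simp only [List.zip_cons_cons]
    have hg : PySem.List.pyGetD outs (s : Int) 0 = outs[s] := by
      simp [PySem.List.pyGetD_natCast, List.getD_eq_getElem?_getD, h1]
    have ht := ih (s+1) (by simp at h ⊢; omega)
    rw [hg, ← ht]; norm_cast

-- B's pairing equals the sorted zip A uses
lemma pvBExtract_eq_zip : ∀ (n : Nat) (ins outs : List Int), ins.length = n → ins.length = outs.length →
    pvBExtract ins outs
      = (PySem.List.sorted ins (fun x => x) false).zip (PySem.List.sorted outs (fun x => x) false) := by
  intro n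
  induction n using Nat.strong_induction_on with
  | _ n ih =>
    intro ins outs hn hlen
    rw [pvBExtract.eq_def]
    split
    next x hmi =>
      have hins : ins = [] := (PySem.List.min?_eq_none_iff _ _).mp hmi
      subst hins
      simp [(PySem.List.sorted_eq_nil_iff _ _ _).mpr rfl]
    next x i hmi =>
      split
      next y hmo =>
        have houts : outs = [] := (PySem.List.min?_eq_none_iff _ _).mp hmo
        subst houts
        simp at hlen
        rw [hlen] at hmi
        simp [PySem.List.min?] at hmi
      next y o hmo =>
        have hi : i ∈ ins := PySem.List.min?_mem hmi
        have ho : o ∈ outs := PySem.List.min?_mem hmo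
        have hri := PySem.List.remove?_eq_some_erase ins i hi
        have hro := PySem.List.remove?_eq_some_erase outs o ho
        split
        next z ins' outs' heq1 heq2 =>
          rw [hri] at heq1; cases heq1
          rw [hro] at heq2; cases heq2
          rw [pvSorted_cons hmi hri, pvSorted_cons hmo hro, List.zip_cons_cons]
          congr 1
          have hli : (ins.erase i).length = n - 1 := by
            rw [List.length_erase_of_mem hi, hn]
          have hlo : (outs.erase o).length = n - 1 := by
            rw [List.length_erase_of_mem ho, ← hlen, hn]
          have hn0 : 0 < n := by
            rw [← hn]; exact List.length_pos_of_mem hi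
          exact ih (n - 1) (by omega) (ins.erase i) (outs.erase o) hli (by omega)
        next z hcontra =>
          exact (hcontra (ins.erase i) (outs.erase o) hri hro).elim

lemma pvAInner_append (xs ys : List (Int × Int)) (m : PySem.Dict Int Int) :
    pvAInner (xs ++ ys) m =
      match pvAInner xs m with
      | none => none
      | some m' => pvAInner ys m' := by
  induction xs generalizing m with
  | nil => simp [pvAInner]
  | cons p rest ih =>
    obtain ⟨k, v⟩ := p
    simp only [List.cons_append, pvAInner]
    split <;> simp [ih]

lemma pvAOuter_eq : ∀ (cms : List (List (String × List Int))) (m : PySem.Dict Int Int),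
    pvAOuter cms m = pvAInner (cms.flatMap pvBPairsOf) m := by
  intro cms
  induction cms with
  | nil => intro m; simp [pvAOuter, pvAInner]
  | cons cm rest ih =>
    intro m
    simp only [pvAOuter, List.flatMap_cons, pvBPairsOf, pvASortedGet, PySem.List.length_sorted]
    by_cases h : ((PySem.Dict.ofList cm).getD "input_colors" ([] : List Int)).length
        = ((PySem.Dict.ofList cm).getD "output_colors" ([] : List Int)).length
    · have hne : ¬ ((PySem.Dict.ofList cm).getD "input_colors" ([] : List Int)).length
          ≠ ((PySem.Dict.ofList cm).getD "output_colors" ([] : List Int)).length := by simp [h]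
      rw [if_neg hne, if_neg hne]
      have hz : pvAPairs
          (PySem.List.sorted ((PySem.Dict.ofList cm).getD "input_colors" []) (fun x => x) false)
          (PySem.List.sorted ((PySem.Dict.ofList cm).getD "output_colors" []) (fun x => x) false)
          = pvBExtract ((PySem.Dict.ofList cm).getD "input_colors" [])
              ((PySem.Dict.ofList cm).getD "output_colors" []) := by
        rw [pvBExtract_eq_zip _ _ _ rfl h]
        have hz' := pvAPairs_eq_zip
          (PySem.List.sorted ((PySem.Dict.ofList cm).getD "input_colors" []) (fun x => x) false)
          (PySem.List.sorted ((PySem.Dict.ofList cm).getD "output_colors" []) (fun x => x) false)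
          0 (by simp [PySem.List.length_sorted, h])
        simpa [pvAPairs] using hz'
      rw [hz, pvAInner_append]
      cases pvAInner (pvBExtract ((PySem.Dict.ofList cm).getD "input_colors" [])
          ((PySem.Dict.ofList cm).getD "output_colors" [])) m <;> simp [ih]
    · rw [if_pos h, if_pos h]
      simp [ih]

-- insert of an already-present binding is the identity (keys are unique)
lemma pvInsert_self {m : PySem.Dict Int Int} {k v : Int}
    (hg : m.get? k = some v) (hnd : m.keys.Nodup) : m.insert k v = m := by
  apply PySem.Dict.ext
  have hc : m.contains k = true := by
    rw [PySem.Dict.contains_eq_isSome_get?, hg]; rfl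
  rw [PySem.Dict.items_insert_of_contains m v hc]
  have hcong : ∀ p ∈ m.items, (if (p.1 == k) = true then (k, v) else p) = id p := by
    intro p hp
    by_cases hk : p.1 = k
    · obtain ⟨k', v'⟩ := p
      simp only at hk; subst hk
      have := PySem.Dict.get?_of_mem_items m hp hnd
      rw [hg] at this; cases this
      simp
    · simp [hk]
  rw [List.map_congr_left hcong, List.map_id]

-- the two validation folds agree on any dict with unique keys
lemma pvInner_eq_validate : ∀ (ps : List (Int × Int)) (m : PySem.Dict Int Int),
    m.keys.Nodup → pvAInner ps m = pvBValidate ps m := by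
  intro ps
  induction ps with
  | nil => intro m _; rfl
  | cons p rest ih =>
    intro m hnd
    obtain ⟨i, o⟩ := p
    simp only [pvAInner, pvBValidate]
    cases hg : m.get? i with
    | none =>
      have hc : m.contains i = false := by
        rw [PySem.Dict.contains_eq_isSome_get?, hg]; rfl
      rw [PySem.Dict.setdefault_of_not_contains m o hc]
      simp only [hc, Bool.false_and, Bool.false_eq_true, if_false,
        Option.getD_none, bne_self_eq_false]
      exact ih _ (PySem.Dict.nodup_keys_insert m i o hnd)
    | some u =>
      have hc : m.contains i = true := by
        rw [PySem.Dict.contains_eq_isSome_get?, hg]; rfl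
      have hgD : m.getD i 0 = u := PySem.Dict.getD_of_get?_eq_some m 0 hg
      rw [PySem.Dict.setdefault_of_contains m o hc]
      simp only [hc, Bool.true_and, hgD, Option.getD_some]
      by_cases hu : u = o
      · subst hu
        simp only [bne_self_eq_false, Bool.false_eq_true, if_false]
        rw [pvInsert_self hg hnd]
        exact ih _ hnd
      · simp [bne_iff_ne, hu]

-- ===== VERDICT (by name: the statement is the Claim_ definition above) =====
theorem detect_color_mapping_setwise_py_spec : Claim_equal_detect_color_mapping_setwise_py := by
  intro cms _
  unfold Spec_detect_color_mapping_setwise_py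
  unfold detect_color_mapping_setwise_py detect_color_mapping_setwise_py_alt
  rw [PySem.List.foldl_append_eq_flatMap]
  by_cases hnil : cms = []
  · subst hnil; rfl
  · rw [if_neg hnil, pvAOuter_eq,
      pvInner_eq_validate _ _ PySem.Dict.nodup_keys_empty]
    simp only [List.nil_append]
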